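-- pv_equiv track=rewrite | github.com/alexwday/u-pipeline | u-ingestion/src/ingestion/stages/chunkers/xlsx_chunker.py | _format_xlsx_batch
-- ===== SOURCE A (Python) =====
-- def _format_xlsx_batch(
--     header_rows_context: list[str],
--     sheet_passthrough_rows: list[str],
--     section_context_rows: list[str],
--     overlap_rows: list[str],
--     batch_rows: list[tuple[int, str]],
-- ) -> str:
--     """Build XML-tagged batch content for the LLM prompt.
--
--     Params:
--         header_rows_context: Lines from the top of the sheet
--         sheet_passthrough_rows: Permanent passthrough row lines
--         section_context_rows: Section passthrough from prior batch
--         overlap_rows: Trailing rows from the previous batch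
--         batch_rows: Current batch as (row_number, line) tuples
--
--     Returns:
--         str — formatted batch with XML section tags
--
--     Example:
--         >>> _format_xlsx_batch(["| 2 | T |"], [], [], [], [])
--         '<sheet_context>\\n| 2 | T |\\n</sheet_context>'
--     """
--     sections: list[str] = []
--
--     if header_rows_context:
--         body = "\n".join(header_rows_context)
--         sections.append(f"<sheet_context>\n{body}\n</sheet_context>")
--
--     if sheet_passthrough_rows:
--         body = "\n".join(sheet_passthrough_rows)
--         sections.append(
--             "<sheet_passthrough>\n" f"{body}\n" "</sheet_passthrough>"
--         )
--
--     if section_context_rows: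
--         body = "\n".join(section_context_rows)
--         sections.append("<section_context>\n" f"{body}\n" "</section_context>")
--
--     if overlap_rows:
--         body = "\n".join(overlap_rows)
--         sections.append(
--             "<prior_chunk_overlap>\n" f"{body}\n" "</prior_chunk_overlap>"
--         )
--
--     if batch_rows:
--         row_lines = [f"[{row_num}] {line}" for row_num, line in batch_rows]
--         body = "\n".join(row_lines)
--         sections.append(f"<current_batch>\n{body}\n</current_batch>")
--
--     return "\n\n".join(sections)
-- ===== SOURCE B (Python) =====
-- def _format_xlsx_batch(
--     header_rows_context,
--     sheet_passthrough_rows,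
--     section_context_rows,
--     overlap_rows,
--     batch_rows,
-- ):
--     """Back-to-front construction: each section is prepended onto the already
--     formatted tail string directly, so no intermediate sections list and no
--     final join exist."""
--
--     def wrap(tag, lines, tail):
--         if not lines:
--             return tail
--         block = f"<{tag}>\n" + "\n".join(lines) + f"\n</{tag}>"
--         return block if not tail else block + "\n\n" + tail
--
--     return wrap(
--         "sheet_context",
--         header_rows_context,
--         wrap(
--             "sheet_passthrough",
--             sheet_passthrough_rows,
--             wrap(
--                 "section_context",
--                 section_context_rows,
--                 wrap(
--                     "prior_chunk_overlap",
--                     overlap_rows,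
--                     wrap(
--                         "current_batch",
--                         [f"[{n}] {line}" for n, line in batch_rows],
--                         "",
--                     ),
--                 ),
--             ),
--         ),
--     )
-- ===== Notes on version B (the rewrite author's own statement) =====
-- stated objective: alternative
-- what changed: Rebuilds the output back-to-front: a single recursive 'wrap' helper prepends each non-empty tagged section directly onto the already formatted tail string, so there is no sections list and no final '\n\n'.join at all.
import Mathlib
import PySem

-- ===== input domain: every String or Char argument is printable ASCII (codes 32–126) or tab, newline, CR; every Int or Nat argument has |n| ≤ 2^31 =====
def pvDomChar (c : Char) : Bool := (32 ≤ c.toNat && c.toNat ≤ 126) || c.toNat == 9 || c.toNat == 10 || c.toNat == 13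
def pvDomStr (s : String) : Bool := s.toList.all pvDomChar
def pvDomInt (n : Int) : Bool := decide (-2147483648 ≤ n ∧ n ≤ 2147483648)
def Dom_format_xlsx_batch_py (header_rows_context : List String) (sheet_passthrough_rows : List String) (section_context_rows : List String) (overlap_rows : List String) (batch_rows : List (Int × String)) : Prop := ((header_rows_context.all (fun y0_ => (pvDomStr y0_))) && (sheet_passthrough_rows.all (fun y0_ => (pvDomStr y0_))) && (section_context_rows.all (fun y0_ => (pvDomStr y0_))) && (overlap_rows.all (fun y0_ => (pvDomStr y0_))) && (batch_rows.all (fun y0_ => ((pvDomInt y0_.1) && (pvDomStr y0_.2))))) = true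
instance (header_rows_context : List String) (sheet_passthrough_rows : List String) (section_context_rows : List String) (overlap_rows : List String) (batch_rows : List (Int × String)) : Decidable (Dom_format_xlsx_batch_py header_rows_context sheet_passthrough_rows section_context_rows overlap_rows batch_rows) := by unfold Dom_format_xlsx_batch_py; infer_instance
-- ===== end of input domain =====

-- B builds the result back-to-front: a single 'wrap' helper prepends each tagged section onto the already formatted tail, so no sections list and no final join exist (objective: alternative decomposition).


-- ===== PORT A =====
def format_xlsx_batch_py (header_rows_context : List String) (sheet_passthrough_rows : List String) (section_context_rows : List String) (overlap_rows : List String) (batch_rows : List (Int × String)) : String :=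
  let sections : List String := []
  let sections := if header_rows_context.isEmpty then sections else
    sections ++ ["<sheet_context>\n" ++ PySem.Str.join "\n" header_rows_context ++ "\n</sheet_context>"]
  let sections := if sheet_passthrough_rows.isEmpty then sections else
    sections ++ ["<sheet_passthrough>\n" ++ PySem.Str.join "\n" sheet_passthrough_rows ++ "\n</sheet_passthrough>"]
  let sections := if section_context_rows.isEmpty then sections else
    sections ++ ["<section_context>\n" ++ PySem.Str.join "\n" section_context_rows ++ "\n</section_context>"]
  let sections := if overlap_rows.isEmpty then sections else
    sections ++ ["<prior_chunk_overlap>\n" ++ PySem.Str.join "\n" overlap_rows ++ "\n</prior_chunk_overlap>"]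
  let sections := if batch_rows.isEmpty then sections else
    let row_lines := batch_rows.map (fun p => "[" ++ PySem.Int.toStr p.1 ++ "] " ++ p.2)
    sections ++ ["<current_batch>\n" ++ PySem.Str.join "\n" row_lines ++ "\n</current_batch>"]
  PySem.Str.join "\n\n" sections

-- ===== PORT B =====
-- B's helper 'wrap': prepend one tagged section (if its lines are non-empty) onto the
-- already formatted tail string; the whole result is built back-to-front by nesting.
def pvWrap (tag : String) (lines : List String) (tail : String) : String :=
  if lines.isEmpty then tail
  else
    let block := "<" ++ tag ++ ">\n" ++ PySem.Str.join "\n" lines ++ "\n</" ++ tag ++ ">"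
    if tail = "" then block else block ++ "\n\n" ++ tail

def format_xlsx_batch_py_alt (header_rows_context : List String) (sheet_passthrough_rows : List String) (section_context_rows : List String) (overlap_rows : List String) (batch_rows : List (Int × String)) : String :=
  pvWrap "sheet_context" header_rows_context
    (pvWrap "sheet_passthrough" sheet_passthrough_rows
      (pvWrap "section_context" section_context_rows
        (pvWrap "prior_chunk_overlap" overlap_rows
          (pvWrap "current_batch"
            (batch_rows.map (fun p => "[" ++ PySem.Int.toStr p.1 ++ "] " ++ p.2)) ""))))
-- ===== PRECONDITION & SPEC =====
def Spec_format_xlsx_batch_py (header_rows_context : List String) (sheet_passthrough_rows : List String) (section_context_rows : List String) (overlap_rows : List String) (batch_rows : List (Int × String)) (out : String) : Prop := out = format_xlsx_batch_py_alt header_rows_context sheet_passthrough_rows section_context_rows overlap_rows batch_rows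
instance (header_rows_context : List String) (sheet_passthrough_rows : List String) (section_context_rows : List String) (overlap_rows : List String) (batch_rows : List (Int × String)) (out : String) : Decidable (Spec_format_xlsx_batch_py header_rows_context sheet_passthrough_rows section_context_rows overlap_rows batch_rows out) := by unfold Spec_format_xlsx_batch_py; infer_instance

-- ===== CLAIM (what is proved, stated in full; the proofs are below) =====
def Claim_equal_format_xlsx_batch_py : Prop := ∀ (header_rows_context : List String) (sheet_passthrough_rows : List String) (section_context_rows : List String) (overlap_rows : List String) (batch_rows : List (Int × String)), Dom_format_xlsx_batch_py header_rows_context sheet_passthrough_rows section_context_rows overlap_rows batch_rows → Spec_format_xlsx_batch_py header_rows_context sheet_passthrough_rows section_context_rows overlap_rows batch_rows (format_xlsx_batch_py header_rows_context sheet_passthrough_rows section_context_rows overlap_rows batch_rows)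

-- ===== LEMMAS AND PROOFS =====

-- The block string B builds for one non-empty section.
def blkStr (tag : String) (lines : List String) : String :=
  "<" ++ tag ++ ">\n" ++ PySem.Str.join "\n" lines ++ "\n</" ++ tag ++ ">"

-- One wrap step folded over a (tag, lines) table; B's nested calls are this foldr on the 5-entry table.
def wrapFoldStep (p : String × List String) (tail : String) : String := pvWrap p.1 p.2 tail

def blkListStep (p : String × List String) (acc : List String) : List String :=
  if p.2.isEmpty then acc else blkStr p.1 p.2 :: acc

lemma blkStr_toList_ne (tag : String) (lines : List String) : (blkStr tag lines).toList ≠ [] := by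
  simp [blkStr]

lemma blocks_toList_ne (ps : List (String × List String)) :
    ∀ s ∈ ps.foldr blkListStep [], s.toList ≠ [] := by
  induction ps with
  | nil => simp
  | cons p t ih =>
    intro s hs
    simp only [List.foldr, blkListStep] at hs
    by_cases hE : p.2.isEmpty
    · simp [hE] at hs; exact ih s hs
    · simp [hE] at hs
      rcases hs with h | h
      · subst h; exact blkStr_toList_ne _ _
      · exact ih s h

lemma join_nil' : PySem.Str.join "\n\n" ([] : List String) = "" := by
  apply String.toList_injective; simp [PySem.Str.join, PySem.Chars.join, List.intercalate]

lemma join_singleton' (x : String) : PySem.Str.join "\n\n" [x] = x := by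
  apply String.toList_injective; simp [PySem.Str.join, PySem.Chars.join, List.intercalate]

lemma join_cons' (x y : String) (l : List String) :
    PySem.Str.join "\n\n" (x :: y :: l) = x ++ "\n\n" ++ PySem.Str.join "\n\n" (y :: l) := by
  apply String.toList_injective
  simp [PySem.Str.join, PySem.Chars.join, List.intercalate]

lemma join_ne_empty (x : String) (l : List String) (hx : x.toList ≠ []) :
    PySem.Str.join "\n\n" (x :: l) ≠ "" := by
  cases l with
  | nil => rw [join_singleton']; intro h; exact hx (by simp [h])
  | cons y t =>
    rw [join_cons']
    intro h
    have h2 := congrArg String.toList h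
    simp [String.toList_append] at h2

-- Each tag's block with the tag variable substituted equals A's fused string literals.
lemma blk_sheet_context (l : List String) :
    blkStr "sheet_context" l = "<sheet_context>\n" ++ PySem.Str.join "\n" l ++ "\n</sheet_context>" := by
  apply String.toList_injective; simp [blkStr, String.toList_append]
lemma blk_sheet_passthrough (l : List String) :
    blkStr "sheet_passthrough" l = "<sheet_passthrough>\n" ++ PySem.Str.join "\n" l ++ "\n</sheet_passthrough>" := by
  apply String.toList_injective; simp [blkStr, String.toList_append]
lemma blk_section_context (l : List String) :
    blkStr "section_context" l = "<section_context>\n" ++ PySem.Str.join "\n" l ++ "\n</section_context>" := by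
  apply String.toList_injective; simp [blkStr, String.toList_append]
lemma blk_prior_chunk_overlap (l : List String) :
    blkStr "prior_chunk_overlap" l = "<prior_chunk_overlap>\n" ++ PySem.Str.join "\n" l ++ "\n</prior_chunk_overlap>" := by
  apply String.toList_injective; simp [blkStr, String.toList_append]
lemma blk_current_batch (l : List String) :
    blkStr "current_batch" l = "<current_batch>\n" ++ PySem.Str.join "\n" l ++ "\n</current_batch>" := by
  apply String.toList_injective; simp [blkStr, String.toList_append]

lemma wrapFold_eq_join (ps : List (String × List String)) :
    ps.foldr wrapFoldStep "" = PySem.Str.join "\n\n" (ps.foldr blkListStep []) := by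
  induction ps with
  | nil => simp [join_nil']
  | cons p t ih =>
    simp only [List.foldr, wrapFoldStep, blkListStep, ih]
    by_cases hE : p.2.isEmpty
    · simp [pvWrap, hE]
    · cases hL : t.foldr blkListStep [] with
      | nil => simp [pvWrap, hE, join_nil', join_singleton', blkStr]
      | cons y r =>
        have hne : PySem.Str.join "\n\n" (y :: r) ≠ "" := by
          apply join_ne_empty
          exact blocks_toList_ne t y (by rw [hL]; exact List.mem_cons_self ..)
        simp only [pvWrap, hE, Bool.false_eq_true, if_false, if_neg hne]
        rw [join_cons' (blkStr p.1 p.2) y r]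
        simp [blkStr]

-- ===== VERDICT (by name: the statement is the Claim_ definition above) =====
theorem format_xlsx_batch_py_spec : Claim_equal_format_xlsx_batch_py := by
  intro h sp sc ov br _
  unfold Spec_format_xlsx_batch_py format_xlsx_batch_py format_xlsx_batch_py_alt
  have hB := wrapFold_eq_join [("sheet_context", h), ("sheet_passthrough", sp),
    ("section_context", sc), ("prior_chunk_overlap", ov),
    ("current_batch", br.map (fun p => "[" ++ PySem.Int.toStr p.1 ++ "] " ++ p.2))]
  simp only [List.foldr, wrapFoldStep, blkListStep] at hB
  rw [hB]
  simp only [List.isEmpty_map, blk_sheet_context, blk_sheet_passthrough, blk_section_context,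
    blk_prior_chunk_overlap, blk_current_batch]
  split_ifs <;> rfl
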